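-- pv_equiv track=rewrite | github.com/jackljk/jackljk.github.io | coding/UCSD/DSC/DSC20/homeworks/hw02.py | playlist_password
-- ===== SOURCE A (Python) =====
-- def playlist_password(playlist_name, limit):
--     """
--     ############################################################## # For
--     this question, I iterate through every character in the string, then I
--     run through a large if/elif statement, which checks what the character
--     in the string is and does the change to the poassword according. And
--     through each , iteration, I check to see if the limit has been reached.
--     If it has been reached, I return the password at that point else the for
--     loop with keep looping until it has gone through all the characters in
--     the string.# # method description and add at least 3 more doctests
--     below. # ##############################################################
--
--     >>> playlist_password("World's Best Lasagne", 10)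
--     'eBsd7rwost'
--     >>> playlist_password('Baked Casserole', 12)
--     'oraCdaBkesse'
--     >>> playlist_password('Hash browns', 11)
--     'orb4s4awns'
--
--     >>> playlist_password('', 10)
--     ''
--     >>> playlist_password('Hi this is just a test string', 100)
--     'irtstsatsisi4t4isjuteng'
--     >>> playlist_password('Helloooo', 4)
--     'e477'
--     """
--     if_l = '7'
--     if_h = '4'
--     password = ''
--     for character in playlist_name:
--         if len(password) != limit:
--             if character.lower() == 'a' or character.lower() == 'e' \
--                     or character.lower() == 'i' \
--                     or character.lower() == 'o' or character.lower() == 'u':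
--                 password = password + character
--                 password = password[::-1]
--             elif character.lower() == 'd' or character.lower() == 'w' \
--                     or character.lower() == 'k':
--                 password = password + character.lower()
--             elif character.lower() == 'l':
--                 password = password + if_l
--             elif character.lower() == 'h':
--                 password = password + if_h
--             elif not character.isalnum():
--                 continue
--             else:
--                 password = password + character
--         else:
--             return password
--     return password
-- ===== SOURCE B (Python) =====
-- def playlist_password(playlist_name, limit):
--     # Deque-as-two-stacks with an orientation flag: a vowel "reversal" is an
--     # O(1) flag toggle instead of reversing the whole password.
--     front, back = [], []   # logical password = front[::-1] + back (then reversed if rev)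
--     rev = False
--     n = 0
--     for c in playlist_name:
--         if n == limit:
--             break
--         l = c.lower()
--         if l in 'aeiou':
--             # append to the logical end, then reverse = toggle orientation
--             if rev:
--                 front.append(c)
--             else:
--                 back.append(c)
--             rev = not rev
--             n += 1
--         elif l in 'dwk':
--             (front if rev else back).append(l)
--             n += 1
--         elif l == 'l':
--             (front if rev else back).append('7')
--             n += 1
--         elif l == 'h':
--             (front if rev else back).append('4')
--             n += 1
--         elif c.isalnum():
--             (front if rev else back).append(c)
--             n += 1
--     s = front[::-1] + back
--     if rev:
--         s.reverse()
--     return ''.join(s)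
-- ===== Notes on version B (the rewrite author's own statement) =====
-- stated objective: faster
-- what changed: Replaces the whole-string reversal after every vowel with a two-stack deque plus an orientation flag (reverse = O(1) flag toggle, appends go to the proper end), assembling the string once at the end.
import Mathlib
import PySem

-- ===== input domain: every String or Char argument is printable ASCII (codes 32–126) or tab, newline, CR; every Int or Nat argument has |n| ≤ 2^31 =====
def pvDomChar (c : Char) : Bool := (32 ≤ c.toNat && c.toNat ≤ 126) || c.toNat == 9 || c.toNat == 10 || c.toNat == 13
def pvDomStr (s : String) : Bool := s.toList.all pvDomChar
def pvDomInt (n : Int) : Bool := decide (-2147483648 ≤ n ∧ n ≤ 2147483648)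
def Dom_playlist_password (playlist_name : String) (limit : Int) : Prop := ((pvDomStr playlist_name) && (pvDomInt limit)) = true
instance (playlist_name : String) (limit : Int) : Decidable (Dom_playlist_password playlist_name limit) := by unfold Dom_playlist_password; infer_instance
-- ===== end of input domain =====

-- B is the same password builder with a two-stack deque and an orientation flag:
-- a vowel 'reversal' toggles the flag instead of reversing the accumulated string.

-- ===== PORT A =====
-- loop of A: state = password so far; early 'return password' when its length hits limit
def pvGoA : List Char → List Char → Int → List Char
  | [], pw, _ => pw
  | c :: cs, pw, limit =>
    if (pw.length : Int) ≠ limit then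
      let lc := PySem.Chars.lowerChar c
      if lc = 'a' ∨ lc = 'e' ∨ lc = 'i' ∨ lc = 'o' ∨ lc = 'u' then
        pvGoA cs (pw ++ [c]).reverse limit
      else if lc = 'd' ∨ lc = 'w' ∨ lc = 'k' then
        pvGoA cs (pw ++ [lc]) limit
      else if lc = 'l' then
        pvGoA cs (pw ++ ['7']) limit
      else if lc = 'h' then
        pvGoA cs (pw ++ ['4']) limit
      else if ¬ PySem.Chars.isalnum c then
        pvGoA cs pw limit
      else
        pvGoA cs (pw ++ [c]) limit
    else pw

def playlist_password (playlist_name : String) (limit : Int) : String :=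
  String.ofList (pvGoA playlist_name.toList [] limit)

-- ===== PORT B =====
-- loop of B: state = (front, back, rev, n); logical password = front[::-1] ++ back, reversed if rev
def pvGoB : List Char → List Char → List Char → Bool → Int → Int → List Char × List Char × Bool
  | [], front, back, rev, _, _ => (front, back, rev)
  | c :: cs, front, back, rev, n, limit =>
    if n = limit then (front, back, rev)
    else
      let lc := PySem.Chars.lowerChar c
      if lc ∈ ['a', 'e', 'i', 'o', 'u'] then
        if rev then pvGoB cs (front ++ [c]) back (!rev) (n + 1) limit
        else pvGoB cs front (back ++ [c]) (!rev) (n + 1) limit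
      else if lc ∈ ['d', 'w', 'k'] then
        if rev then pvGoB cs (front ++ [lc]) back rev (n + 1) limit
        else pvGoB cs front (back ++ [lc]) rev (n + 1) limit
      else if lc = 'l' then
        if rev then pvGoB cs (front ++ ['7']) back rev (n + 1) limit
        else pvGoB cs front (back ++ ['7']) rev (n + 1) limit
      else if lc = 'h' then
        if rev then pvGoB cs (front ++ ['4']) back rev (n + 1) limit
        else pvGoB cs front (back ++ ['4']) rev (n + 1) limit
      else if PySem.Chars.isalnum c then
        if rev then pvGoB cs (front ++ [c]) back rev (n + 1) limit
        else pvGoB cs front (back ++ [c]) rev (n + 1) limit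
      else pvGoB cs front back rev n limit

def pvAssemble : List Char × List Char × Bool → List Char
  | (front, back, rev) =>
    let s := front.reverse ++ back
    if rev then s.reverse else s

def playlist_password_alt (playlist_name : String) (limit : Int) : String :=
  String.ofList (pvAssemble (pvGoB playlist_name.toList [] [] false 0 limit))

-- ===== PRECONDITION & SPEC =====
def Spec_playlist_password (playlist_name : String) (limit : Int) (out : String) : Prop := out = playlist_password_alt playlist_name limit
instance (playlist_name : String) (limit : Int) (out : String) : Decidable (Spec_playlist_password playlist_name limit out) := by unfold Spec_playlist_password; infer_instance

-- ===== CLAIM (what is proved, stated in full; the proofs are below) =====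
def Claim_equal_playlist_password : Prop := ∀ (playlist_name : String) (limit : Int), Dom_playlist_password playlist_name limit → Spec_playlist_password playlist_name limit (playlist_password playlist_name limit)

-- ===== LEMMAS AND PROOFS =====

theorem pvAssemble_length (f b : List Char) (r : Bool) :
    (pvAssemble (f, b, r)).length = f.length + b.length := by
  cases r <;> simp [pvAssemble] <;> omega

theorem pvGo_eq (cs : List Char) : ∀ (front back : List Char) (rev : Bool) (limit n : Int),
    n = (front.length : Int) + (back.length : Int) →
    pvGoA cs (pvAssemble (front, back, rev)) limit =
      pvAssemble (pvGoB cs front back rev n limit) := by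
  induction cs with
  | nil => intro front back rev limit n hn; simp [pvGoA, pvGoB]
  | cons c cs ih =>
    intro front back rev limit n hn
    rw [pvGoA, pvGoB]
    by_cases hstop : n = limit
    · have hlen : ¬ ((pvAssemble (front, back, rev)).length : Int) ≠ limit := by
        rw [pvAssemble_length]; omega
      rw [if_neg hlen, if_pos hstop]
    · have hne : ((pvAssemble (front, back, rev)).length : Int) ≠ limit := by
        rw [pvAssemble_length]; omega
      rw [if_pos hne, if_neg hstop]
      set lc := PySem.Chars.lowerChar c with hlc
      by_cases h1 : lc = 'a' ∨ lc = 'e' ∨ lc = 'i' ∨ lc = 'o' ∨ lc = 'u'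
      · have h1' : lc ∈ ['a', 'e', 'i', 'o', 'u'] := by simpa using h1
        rw [if_pos h1, if_pos h1']
        cases rev with
        | false =>
          rw [if_neg Bool.false_ne_true,
              show (pvAssemble (front, back, false) ++ [c]).reverse =
                pvAssemble (front, back ++ [c], true) from by simp [pvAssemble]]
          exact ih front (back ++ [c]) true limit (n + 1) (by simp; omega)
        | true =>
          rw [if_pos rfl,
              show (pvAssemble (front, back, true) ++ [c]).reverse =
                pvAssemble (front ++ [c], back, false) from by simp [pvAssemble]]
          exact ih (front ++ [c]) back false limit (n + 1) (by simp; omega)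
      · have h1' : lc ∉ ['a', 'e', 'i', 'o', 'u'] := by simpa using h1
        rw [if_neg h1, if_neg h1']
        by_cases h2 : lc = 'd' ∨ lc = 'w' ∨ lc = 'k'
        · have h2' : lc ∈ ['d', 'w', 'k'] := by simpa using h2
          rw [if_pos h2, if_pos h2']
          cases rev with
          | false =>
            rw [if_neg Bool.false_ne_true,
                show pvAssemble (front, back, false) ++ [lc] =
                  pvAssemble (front, back ++ [lc], false) from by simp [pvAssemble]]
            exact ih front (back ++ [lc]) false limit (n + 1) (by simp; omega)
          | true =>
            rw [if_pos rfl,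
                show pvAssemble (front, back, true) ++ [lc] =
                  pvAssemble (front ++ [lc], back, true) from by simp [pvAssemble]]
            exact ih (front ++ [lc]) back true limit (n + 1) (by simp; omega)
        · have h2' : lc ∉ ['d', 'w', 'k'] := by simpa using h2
          rw [if_neg h2, if_neg h2']
          by_cases h3 : lc = 'l'
          · rw [if_pos h3, if_pos h3]
            cases rev with
            | false =>
              rw [if_neg Bool.false_ne_true,
                  show pvAssemble (front, back, false) ++ ['7'] =
                    pvAssemble (front, back ++ ['7'], false) from by simp [pvAssemble]]
              exact ih front (back ++ ['7']) false limit (n + 1) (by simp; omega)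
            | true =>
              rw [if_pos rfl,
                  show pvAssemble (front, back, true) ++ ['7'] =
                    pvAssemble (front ++ ['7'], back, true) from by simp [pvAssemble]]
              exact ih (front ++ ['7']) back true limit (n + 1) (by simp; omega)
          · rw [if_neg h3, if_neg h3]
            by_cases h4 : lc = 'h'
            · rw [if_pos h4, if_pos h4]
              cases rev with
              | false =>
                rw [if_neg Bool.false_ne_true,
                    show pvAssemble (front, back, false) ++ ['4'] =
                      pvAssemble (front, back ++ ['4'], false) from by simp [pvAssemble]]
                exact ih front (back ++ ['4']) false limit (n + 1) (by simp; omega)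
              | true =>
                rw [if_pos rfl,
                    show pvAssemble (front, back, true) ++ ['4'] =
                      pvAssemble (front ++ ['4'], back, true) from by simp [pvAssemble]]
                exact ih (front ++ ['4']) back true limit (n + 1) (by simp; omega)
            · rw [if_neg h4, if_neg h4]
              by_cases h5 : PySem.Chars.isalnum c = true
              · rw [if_neg (show ¬¬(PySem.Chars.isalnum c = true) from by simp [h5]),
                    if_pos h5]
                cases rev with
                | false =>
                  rw [if_neg Bool.false_ne_true,
                      show pvAssemble (front, back, false) ++ [c] =
                        pvAssemble (front, back ++ [c], false) from by simp [pvAssemble]]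
                  exact ih front (back ++ [c]) false limit (n + 1) (by simp; omega)
                | true =>
                  rw [if_pos rfl,
                      show pvAssemble (front, back, true) ++ [c] =
                        pvAssemble (front ++ [c], back, true) from by simp [pvAssemble]]
                  exact ih (front ++ [c]) back true limit (n + 1) (by simp; omega)
              · rw [if_pos h5, if_neg h5]
                exact ih front back rev limit n hn

-- ===== VERDICT (by name: the statement is the Claim_ definition above) =====
theorem playlist_password_spec : Claim_equal_playlist_password := by
  intro s limit _
  unfold Spec_playlist_password playlist_password playlist_password_alt
  have h := pvGo_eq s.toList [] [] false limit 0 (by simp)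
  rw [show pvAssemble ([], [], false) = ([] : List Char) from rfl] at h
  exact congrArg String.ofList h
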